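-- pv_equiv track=rewrite | github.com/Harinath-Rajendran/pageindex-rag | app.py | filter_excel_by_tokens
-- ===== SOURCE A (Python) =====
-- def filter_excel_by_tokens(text: str, tokens: list, keep_context: int = 2) -> str:
--     """
--     Keep sheet headers + rows that match any token + N surrounding rows.
--     If no matches at all, return full text (don't hide data).
--     """
--     if not tokens or not text: return text
--     lines = text.split("\n")
--     keep = [False] * len(lines)
--     tok_lower = [t.lower() for t in tokens]
--     for i, ln in enumerate(lines):
--         low = ln.lower()
--         if ln.startswith("=== Sheet:"):
--             keep[i] = True
--             continue
--         if any(t in low for t in tok_lower):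
--             for j in range(max(0, i - keep_context), min(len(lines), i + keep_context + 1)):
--                 keep[j] = True
--     if not any(keep[i] for i in range(len(lines)) if not lines[i].startswith("=== Sheet:")):
--         return text
--     out, last_kept = [], False
--     for i, ln in enumerate(lines):
--         if keep[i]:
--             out.append(ln); last_kept = True
--         elif last_kept:
--             out.append("…"); last_kept = False
--     return "\n".join(out)
-- ===== SOURCE B (Python) =====
-- def filter_excel_by_tokens(text: str, tokens: list, keep_context: int = 2) -> str:
--     """Gather formulation: per line, look backward/forward for a nearby match
--     instead of scattering a window of keep-flags; emit kept indices with gap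
--     detection instead of a last_kept flag."""
--     if not tokens or not text:
--         return text
--     lines = text.split("\n")
--     n = len(lines)
--     toks = [t.lower() for t in tokens]
--     is_header = [ln.startswith("=== Sheet:") for ln in lines]
--     is_match = [(not is_header[i]) and any(t in lines[i].lower() for t in toks)
--                 for i in range(n)]
--     if keep_context < 0 or not any(is_match):
--         return text
--     kept = [i for i in range(n)
--             if is_header[i]
--             or any(is_match[j] for j in range(max(0, i - keep_context),
--                                               min(n, i + keep_context + 1)))]
--     chunks = []
--     prev = -1
--     for i in kept:
--         if prev >= 0 and i > prev + 1:
--             chunks.append("…")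
--         chunks.append(lines[i])
--         prev = i
--     if prev >= 0 and prev < n - 1:
--         chunks.append("…")
--     return "\n".join(chunks)
-- ===== Notes on version B (the rewrite author's own statement) =====
-- stated objective: alternative
-- what changed: B replaces A's scatter-style boolean keep-array (each match writes True into a window) and stateful last_kept emit loop with a gather formulation: per-line header/match flags computed once, each line keeps itself by looking for a match in its own window, and output is emitted from the list of kept indices with gap detection plus a trailing-ellipsis check.
import Mathlib
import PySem

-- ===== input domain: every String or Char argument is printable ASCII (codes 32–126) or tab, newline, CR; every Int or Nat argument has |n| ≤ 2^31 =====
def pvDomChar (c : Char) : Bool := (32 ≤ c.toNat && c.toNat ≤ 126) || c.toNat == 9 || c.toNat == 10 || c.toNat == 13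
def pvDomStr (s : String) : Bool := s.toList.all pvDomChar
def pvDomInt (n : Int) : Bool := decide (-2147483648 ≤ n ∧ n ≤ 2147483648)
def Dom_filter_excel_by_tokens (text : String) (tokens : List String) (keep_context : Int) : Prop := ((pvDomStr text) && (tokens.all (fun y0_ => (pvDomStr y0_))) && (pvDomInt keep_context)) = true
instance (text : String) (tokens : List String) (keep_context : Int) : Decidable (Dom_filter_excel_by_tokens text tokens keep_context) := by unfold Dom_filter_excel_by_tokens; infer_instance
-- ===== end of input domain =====

-- B re-implements the filter in gather style (each line looks for a nearby match) with a
-- gap-based emitter over kept indices, replacing A's scatter into a boolean array and its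
-- stateful last_kept scan; objective: alternative decomposition, same asymptotic cost.

-- shared trivial leaves (both Pythons use the identical expressions)
def pvHdr (ln : String) : Bool := PySem.Str.startswith ln "=== Sheet:"
def pvLinesOf (text : String) : List String := (PySem.Str.split? text "\n").getD []
-- `split? text "\n"` is `some` since the separator is non-empty, so `.getD []` is exact
def pvTokMatch (toks : List String) (ln : String) : Bool :=
  toks.any (fun t => PySem.Str.isIn t (PySem.Str.lower ln))

-- ===== PORT A =====
-- inner `for j in range(max(0, i-kc), min(len(lines), i+kc+1)): keep[j] = True`
def pvMark (ks : List Bool) (a b : Int) : List Bool :=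
  (PySem.List.pyRange a b 1).foldl (fun ks j => ks.set j.toNat true) ks
-- the first `for i, ln in enumerate(lines)` loop building the keep array
def pvKeepA (lines : List String) (tok_lower : List String) (kc : Int) : List Bool :=
  (PySem.List.enumerate lines 0).foldl
    (fun keep p =>
      if pvHdr p.2 then keep.set p.1.toNat true
      else if pvTokMatch tok_lower p.2 then
        pvMark keep (max 0 (p.1 - kc)) (min (lines.length : Int) (p.1 + kc + 1))
      else keep)
    (List.replicate lines.length false)
-- the second `for i, ln in enumerate(lines)` loop with `last_kept`
def pvEmitA (lines : List String) (keep : List Bool) : List String :=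
  ((PySem.List.enumerate lines 0).foldl
    (fun (s : List String × Bool) p =>
      if keep.getD p.1.toNat false then (s.1 ++ [p.2], true)
      else if s.2 then (s.1 ++ ["…"], false)
      else s)
    ([], false)).1

def filter_excel_by_tokens (text : String) (tokens : List String) (keep_context : Int) : String :=
  if tokens = [] ∨ text = "" then text
  else
    let lines := pvLinesOf text
    let tok_lower := tokens.map PySem.Str.lower
    let keep := pvKeepA lines tok_lower keep_context
    if !((List.range lines.length).any
          (fun i => !(pvHdr (lines.getD i "")) && keep.getD i false)) then text
    else PySem.Str.join "\n" (pvEmitA lines keep)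

-- ===== PORT B =====
-- `any(is_match[j] for j in range(max(0, i-kc), min(n, i+kc+1)))`
def pvWinAny (is_match : List Bool) (n : Int) (i : Int) (kc : Int) : Bool :=
  (PySem.List.pyRange (max 0 (i - kc)) (min n (i + kc + 1)) 1).any
    (fun j => is_match.getD j.toNat false)
-- `for i in kept: …` gap-based chunk emitter plus the trailing ellipsis check
def pvEmitB (lines : List String) (kept : List Nat) : List String :=
  let s := kept.foldl
    (fun (s : List String × Int) (i : Nat) =>
      ((if 0 ≤ s.2 ∧ (i : Int) > s.2 + 1 then s.1 ++ ["…"] else s.1) ++ [lines.getD i ""],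
       (i : Int)))
    ([], -1)
  s.1 ++ (if 0 ≤ s.2 ∧ s.2 < (lines.length : Int) - 1 then ["…"] else [])

def filter_excel_by_tokens_alt (text : String) (tokens : List String) (keep_context : Int) : String :=
  if tokens = [] ∨ text = "" then text
  else
    let lines := pvLinesOf text
    let n := lines.length
    let toks := tokens.map PySem.Str.lower
    let is_header := lines.map pvHdr
    let is_match := (List.range n).map
      (fun i => !(is_header.getD i false) && pvTokMatch toks (lines.getD i ""))
    if keep_context < 0 ∨ !(is_match.any (fun b => b)) then text
    else
      let kept := (List.range n).filter
        (fun i => is_header.getD i false || pvWinAny is_match (n : Int) (i : Int) keep_context)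
      PySem.Str.join "\n" (pvEmitB lines kept)

-- ===== PRECONDITION & SPEC =====
def Spec_filter_excel_by_tokens (text : String) (tokens : List String) (keep_context : Int) (out : String) : Prop := out = filter_excel_by_tokens_alt text tokens keep_context
instance (text : String) (tokens : List String) (keep_context : Int) (out : String) : Decidable (Spec_filter_excel_by_tokens text tokens keep_context out) := by unfold Spec_filter_excel_by_tokens; infer_instance

-- ===== CLAIM (what is proved, stated in full; the proofs are below) =====
def Claim_equal_filter_excel_by_tokens : Prop := ∀ (text : String) (tokens : List String) (keep_context : Int), Dom_filter_excel_by_tokens text tokens keep_context → Spec_filter_excel_by_tokens text tokens keep_context (filter_excel_by_tokens text tokens keep_context)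

-- ===== LEMMAS AND PROOFS =====

-- the kept-set both programs compute: header lines plus every line inside the window of a
-- non-header token match
def pvKeepSpec (lines toks : List String) (kc : Int) (i : Nat) : Prop :=
  i < lines.length ∧
    (pvHdr (lines.getD i "") = true ∨
      ∃ j : Nat, j < lines.length ∧ pvHdr (lines.getD j "") = false ∧
        pvTokMatch toks (lines.getD j "") = true ∧
        max 0 ((j : Int) - kc) ≤ (i : Int) ∧ (i : Int) < min (lines.length : Int) ((j : Int) + kc + 1))

theorem pv_set_getD (ks : List Bool) (j i : Nat) :
    ((ks.set j true).getD i false = true) ↔ ((i = j ∧ j < ks.length) ∨ ks.getD i false = true) := by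
  rcases eq_or_ne j i with rfl | h
  · by_cases hl : j < ks.length
    · simp [List.getD_eq_getElem?_getD, List.getElem?_set_self hl, hl]
    · rw [List.set_eq_of_length_le (by omega)]
      simp [hl]
  · rw [List.getD_eq_getElem?_getD, List.getElem?_set_ne h, ← List.getD_eq_getElem?_getD]
    constructor
    · exact Or.inr
    · rintro (⟨h1, _⟩ | hh)
      · exact absurd h1.symm h
      · exact hh

theorem pv_foldl_set_length (js : List Int) (ks : List Bool) :
    (js.foldl (fun ks j => ks.set j.toNat true) ks).length = ks.length := by
  induction js generalizing ks with
  | nil => rfl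
  | cons a t ih => simp [List.foldl_cons, ih, List.length_set]

theorem pvMark_length (ks : List Bool) (a b : Int) : (pvMark ks a b).length = ks.length :=
  pv_foldl_set_length _ _

theorem pvMark_getD (i : Nat) (k : Nat) : ∀ (a b : Int) (ks : List Bool), 0 ≤ a → (b - a).toNat = k →
    ((pvMark ks a b).getD i false = true ↔
      ((a ≤ (i : Int) ∧ (i : Int) < b ∧ i < ks.length) ∨ ks.getD i false = true)) := by
  induction k with
  | zero =>
    intro a b ks ha hk
    have hba : b ≤ a := by omega
    unfold pvMark
    rw [PySem.List.pyRange_one_eq_nil hba]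
    simp only [List.foldl_nil]
    constructor
    · exact Or.inr
    · rintro (⟨h1, h2, _⟩ | h) ; · omega
      · exact h
  | succ k ih =>
    intro a b ks ha hk
    have hab : a < b := by omega
    unfold pvMark
    rw [PySem.List.pyRange_one_cons hab]
    simp only [List.foldl_cons]
    have := ih (a + 1) b (ks.set a.toNat true) (by omega) (by omega)
    unfold pvMark at this
    rw [this, pv_set_getD]
    simp only [List.length_set]
    constructor
    · rintro (⟨h1, h2, h3⟩ | ⟨h1, h2⟩ | h)
      · exact Or.inl ⟨by omega, h2, h3⟩
      · exact Or.inl ⟨by omega, by omega, by omega⟩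
      · exact Or.inr h
    · rintro (⟨h1, h2, h3⟩ | h)
      · by_cases hia : (i : Int) = a
        · exact Or.inr (Or.inl ⟨by omega, by omega⟩)
        · exact Or.inl ⟨by omega, h2, h3⟩
      · exact Or.inr (Or.inr h)

theorem pvKeepA_core (lines toks : List String) (kc : Int) :
    ∀ (es : List String) (s : Nat) (ks : List Bool), ks.length = lines.length →
    ((PySem.List.enumerate es (s : Int)).foldl
      (fun keep p =>
        if pvHdr p.2 then keep.set p.1.toNat true
        else if pvTokMatch toks p.2 then
          pvMark keep (max 0 (p.1 - kc)) (min (lines.length : Int) (p.1 + kc + 1))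
        else keep) ks).length = lines.length ∧
    ∀ i : Nat,
      (((PySem.List.enumerate es (s : Int)).foldl
        (fun keep p =>
          if pvHdr p.2 then keep.set p.1.toNat true
          else if pvTokMatch toks p.2 then
            pvMark keep (max 0 (p.1 - kc)) (min (lines.length : Int) (p.1 + kc + 1))
          else keep) ks).getD i false = true ↔
        (ks.getD i false = true ∨ ∃ j : Nat, j < es.length ∧
          ((pvHdr (es.getD j "") = true ∧ i = s + j ∧ i < lines.length) ∨
           (pvHdr (es.getD j "") = false ∧ pvTokMatch toks (es.getD j "") = true ∧
             max 0 (((s + j : Nat) : Int) - kc) ≤ (i : Int) ∧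
             (i : Int) < min (lines.length : Int) (((s + j : Nat) : Int) + kc + 1))))) := by
  intro es
  induction es with
  | nil =>
    intro s ks hlen
    simp [hlen]
  | cons e es ih =>
    intro s ks hlen
    rw [PySem.List.enumerate_cons]
    simp only [List.foldl_cons]
    set ks' := (if pvHdr e then ks.set ((s : Int)).toNat true
        else if pvTokMatch toks e then
          pvMark ks (max 0 ((s : Int) - kc)) (min (lines.length : Int) ((s : Int) + kc + 1))
        else ks) with hks'
    have hlen' : ks'.length = lines.length := by
      rw [hks']; split
      · simpa [List.length_set] using hlen
      · split
        · simpa [pvMark_length] using hlen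
        · exact hlen
    have hcast : (s : Int) + 1 = ((s + 1 : Nat) : Int) := by push_cast; ring
    rw [hcast]
    obtain ⟨hL, hIH⟩ := ih (s + 1) ks' hlen'
    refine ⟨hL, fun i => ?_⟩
    rw [hIH i]
    have heff : (ks'.getD i false = true) ↔
        ((ks.getD i false = true) ∨
          ((pvHdr e = true ∧ i = s ∧ i < lines.length) ∨
           (pvHdr e = false ∧ pvTokMatch toks e = true ∧
             max 0 ((s : Int) - kc) ≤ (i : Int) ∧
             (i : Int) < min (lines.length : Int) ((s : Int) + kc + 1)))) := by
      rw [hks']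
      by_cases h1 : pvHdr e = true
      · rw [if_pos h1, show ((s : Int)).toNat = s from Int.toNat_natCast s, pv_set_getD]
        constructor
        · rintro (⟨rfl, hs⟩ | h)
          · exact Or.inr (Or.inl ⟨h1, rfl, by omega⟩)
          · exact Or.inl h
        · rintro (h | ⟨_, rfl, hi⟩ | ⟨hf, _⟩)
          · exact Or.inr h
          · exact Or.inl ⟨rfl, by omega⟩
          · rw [h1] at hf; exact absurd hf (by simp)
      · rw [if_neg h1]
        have h1' : pvHdr e = false := by simpa using h1
        by_cases h2 : pvTokMatch toks e = true
        · rw [if_pos h2, pvMark_getD i _ _ _ _ (le_max_left _ _) rfl]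
          constructor
          · rintro (⟨ha, hb, hc⟩ | h)
            · exact Or.inr (Or.inr ⟨h1', h2, ha, hb⟩)
            · exact Or.inl h
          · rintro (h | ⟨ht, _⟩ | ⟨_, _, ha, hb⟩)
            · exact Or.inr h
            · exact absurd ht h1
            · exact Or.inl ⟨ha, hb, by omega⟩
        · rw [if_neg h2]
          constructor
          · exact fun h => Or.inl h
          · rintro (h | ⟨ht, _⟩ | ⟨_, hm, _⟩)
            · exact h
            · exact absurd ht h1
            · exact absurd hm h2
    rw [heff]
    constructor
    · rintro ((h | h) | ⟨j, hj, hc⟩)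
      · exact Or.inl h
      · refine Or.inr ⟨0, by simp, ?_⟩
        simpa using h
      · refine Or.inr ⟨j + 1, by simpa using Nat.succ_lt_succ hj, ?_⟩
        simp only [List.getD_cons_succ]
        rcases hc with ⟨ha, hb, hcc⟩ | ⟨ha, hb, hc1, hc2⟩
        · exact Or.inl ⟨ha, by omega, hcc⟩
        · exact Or.inr ⟨ha, hb, by omega, by omega⟩
    · rintro (h | ⟨j, hj, hc⟩)
      · exact Or.inl (Or.inl h)
      · cases j with
        | zero =>
          refine Or.inl (Or.inr ?_)
          simpa using hc
        | succ j =>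
          refine Or.inr ⟨j, by simpa using hj, ?_⟩
          simp only [List.getD_cons_succ] at hc
          rcases hc with ⟨ha, hb, hcc⟩ | ⟨ha, hb, hc1, hc2⟩
          · exact Or.inl ⟨ha, by omega, hcc⟩
          · exact Or.inr ⟨ha, hb, by omega, by omega⟩

theorem pv_getD_replicate_false (n i : Nat) : (List.replicate n false).getD i false = false := by
  rcases lt_or_ge i n with h | h
  · exact List.getD_replicate _ h
  · exact List.getD_eq_default _ _ (by simpa using h)

theorem pvKeepA_getD (lines toks : List String) (kc : Int) (i : Nat) :
    ((pvKeepA lines toks kc).getD i false = true) ↔ pvKeepSpec lines toks kc i := by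
  obtain ⟨_, hIH⟩ := pvKeepA_core lines toks kc lines 0 (List.replicate lines.length false) (by simp)
  unfold pvKeepA
  rw [show ((0 : Nat) : Int) = (0 : Int) from rfl] at hIH
  rw [hIH i]
  simp only [pv_getD_replicate_false, Bool.false_eq_true, false_or, Nat.zero_add]
  unfold pvKeepSpec
  constructor
  · rintro ⟨j, hj, ⟨ha, rfl, hi⟩ | ⟨ha, hb, h1, h2⟩⟩
    · exact ⟨hi, Or.inl ha⟩
    · exact ⟨by omega, Or.inr ⟨j, hj, ha, hb, h1, h2⟩⟩
  · rintro ⟨hi, hh | ⟨j, hj, ha, hb, h1, h2⟩⟩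
    · exact ⟨i, hi, Or.inl ⟨hh, rfl, hi⟩⟩
    · exact ⟨j, hj, Or.inr ⟨ha, hb, h1, h2⟩⟩

theorem pv_getD_map_hdr (lines : List String) (i : Nat) (hi : i < lines.length) :
    (lines.map pvHdr).getD i false = pvHdr (lines.getD i "") := by
  rw [List.getD_eq_getElem?_getD, List.getElem?_map, List.getElem?_eq_getElem (by simpa using hi)]
  simp [List.getD_eq_getElem?_getD, List.getElem?_eq_getElem hi]

-- B's per-line keep test agrees with the spec (for i < n)
theorem pvKeptPred_iff (lines toks : List String) (kc : Int) (i : Nat) (hi : i < lines.length) :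
    (((lines.map pvHdr).getD i false ||
        pvWinAny ((List.range lines.length).map
          (fun j => !((lines.map pvHdr).getD j false) && pvTokMatch toks (lines.getD j "")))
          (lines.length : Int) (i : Int) kc) = true) ↔ pvKeepSpec lines toks kc i := by
  rw [pv_getD_map_hdr lines i hi]
  unfold pvWinAny
  rw [Bool.or_eq_true, List.any_eq_true]
  unfold pvKeepSpec
  constructor
  · rintro (hh | ⟨j, hjmem, hmatch⟩)
    · exact ⟨hi, Or.inl hh⟩
    · rw [PySem.List.mem_pyRange_one] at hjmem
      obtain ⟨hj1, hj2⟩ := hjmem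
      have hj0 : 0 ≤ j := le_trans (le_max_left 0 _) hj1
      have hjn : j.toNat < lines.length := by omega
      rw [PySem.List.getD_map_range _ _ _ _ hjn, Bool.and_eq_true, Bool.not_eq_true'] at hmatch
      obtain ⟨hm1, hm2⟩ := hmatch
      rw [pv_getD_map_hdr lines _ hjn] at hm1
      exact ⟨hi, Or.inr ⟨j.toNat, hjn, hm1, hm2, by omega, by omega⟩⟩
  · rintro ⟨_, hh | ⟨j, hjn, ha, hb, h1, h2⟩⟩
    · exact Or.inl hh
    · refine Or.inr ⟨(j : Int), ?_, ?_⟩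
      · rw [PySem.List.mem_pyRange_one]; omega
      · rw [Int.toNat_natCast, PySem.List.getD_map_range _ _ _ _ hjn, Bool.and_eq_true,
          Bool.not_eq_true']
        exact ⟨by rw [pv_getD_map_hdr lines _ hjn]; exact ha, hb⟩

-- last kept index strictly below m (-1 when none) and the "previous line kept" flag
def pvLastKept (K : Nat → Bool) : Nat → Int
  | 0 => -1
  | m + 1 => if K m then (m : Int) else pvLastKept K m

def pvLFlag (K : Nat → Bool) : Nat → Bool
  | 0 => false
  | m + 1 => K m

theorem pvLastKept_lt (K : Nat → Bool) (m : Nat) : pvLastKept K m < (m : Int) := by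
  induction m with
  | zero => simp [pvLastKept]
  | succ m ih => unfold pvLastKept; split <;> omega

theorem pvLastKept_succ_eq_iff (K : Nat → Bool) (m : Nat) :
    pvLastKept K (m + 1) = (m : Int) ↔ K m = true := by
  have := pvLastKept_lt K m
  unfold pvLastKept
  cases hK : K m
  · simp only [hK, Bool.false_eq_true, if_false, iff_false]
    omega
  · simp [hK]

theorem pvLFlag_lastKept (K : Nat → Bool) (m : Nat) (h : pvLFlag K m = true) :
    pvLastKept K m = (m : Int) - 1 := by
  cases m with
  | zero => simp [pvLFlag] at h
  | succ m =>
    simp only [pvLFlag] at h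
    unfold pvLastKept
    rw [if_pos h]
    push_cast
    ring

theorem pvEmit_rel (K : Nat → Bool) (line : Nat → String) (m : Nat) :
    ((List.range m).foldl
      (fun (s : List String × Int) (k : Nat) =>
        if K k then
          ((if 0 ≤ s.2 ∧ (k : Int) > s.2 + 1 then s.1 ++ ["…"] else s.1) ++ [line k], (k : Int))
        else s) ([], -1)).2 = pvLastKept K m ∧
    ((List.range m).foldl
      (fun (s : List String × Bool) (k : Nat) =>
        if K k then (s.1 ++ [line k], true)
        else if s.2 then (s.1 ++ ["…"], false) else s) ([], false)).2 = pvLFlag K m ∧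
    ((List.range m).foldl
      (fun (s : List String × Bool) (k : Nat) =>
        if K k then (s.1 ++ [line k], true)
        else if s.2 then (s.1 ++ ["…"], false) else s) ([], false)).1 =
      ((List.range m).foldl
        (fun (s : List String × Int) (k : Nat) =>
          if K k then
            ((if 0 ≤ s.2 ∧ (k : Int) > s.2 + 1 then s.1 ++ ["…"] else s.1) ++ [line k], (k : Int))
          else s) ([], -1)).1 ++
        (if pvLFlag K m = false ∧ 0 ≤ pvLastKept K m then ["…"] else []) := by
  induction m with
  | zero => simp [pvLastKept, pvLFlag]
  | succ m ih =>
    obtain ⟨ih1, ih2, ih3⟩ := ih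
    rw [List.range_succ]
    simp only [List.foldl_append, List.foldl_cons, List.foldl_nil]
    have hlt := pvLastKept_lt K m
    by_cases hK : K m = true
    · have hlk : pvLastKept K (m + 1) = (m : Int) := by unfold pvLastKept; rw [if_pos hK]
      have hlf : pvLFlag K (m + 1) = true := by simpa [pvLFlag] using hK
      simp only [if_pos hK, hlk, hlf]
      refine ⟨by simp, by simp, ?_⟩
      simp only [Bool.true_eq_false, false_and, if_false, List.append_nil, ih1, ih3]
      by_cases hf : pvLFlag K m = true
      · have h1 := pvLFlag_lastKept K m hf
        have hc1 : ¬(0 ≤ pvLastKept K m ∧ (m : Int) > pvLastKept K m + 1) := by omega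
        have hc2 : ¬(pvLFlag K m = false ∧ 0 ≤ pvLastKept K m) := by simp [hf]
        simp only [if_neg hc1, if_neg hc2, List.append_nil]
      · have hf' : pvLFlag K m = false := by simpa using hf
        by_cases h0 : 0 ≤ pvLastKept K m
        · have hgap : pvLastKept K m + 1 < (m : Int) := by
            cases m with
            | zero => simp [pvLastKept] at h0
            | succ m =>
              have hKm : K m = false := by simpa [pvLFlag] using hf'
              have := pvLastKept_lt K m
              unfold pvLastKept
              rw [if_neg (by simp [hKm])]
              omega
          have hc1 : 0 ≤ pvLastKept K m ∧ (m : Int) > pvLastKept K m + 1 := ⟨h0, by omega⟩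
          have hc2 : pvLFlag K m = false ∧ 0 ≤ pvLastKept K m := ⟨hf', h0⟩
          simp only [if_pos hc1, if_pos hc2]
        · have hc1 : ¬(0 ≤ pvLastKept K m ∧ (m : Int) > pvLastKept K m + 1) := by omega
          have hc2 : ¬(pvLFlag K m = false ∧ 0 ≤ pvLastKept K m) := by tauto
          simp only [if_neg hc1, if_neg hc2, List.append_nil]
    · have hK' : K m = false := by simpa using hK
      have hlk : pvLastKept K (m + 1) = pvLastKept K m := by
        simp [pvLastKept, hK']
      have hlf : pvLFlag K (m + 1) = false := by simp [pvLFlag, hK']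
      simp only [if_neg hK, hlk, hlf]
      refine ⟨by rw [ih1], ?_, ?_⟩
      · by_cases hf : pvLFlag K m = true
        · simp [ih2, hf]
        · simp [ih2, hf, (by simpa using hf : pvLFlag K m = false)]
      · by_cases hf : pvLFlag K m = true
        · have h1 := pvLFlag_lastKept K m hf
          have hm0 : m ≠ 0 := by rintro rfl; simp [pvLFlag] at hf
          have hc2 : ¬(pvLFlag K m = false ∧ 0 ≤ pvLastKept K m) := by simp [hf]
          have hc3 : (True ∧ 0 ≤ pvLastKept K m) := ⟨trivial, by omega⟩
          simp only [ih2, if_pos hf, ih3, if_neg hc2, List.append_nil, if_pos hc3]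
        · have hf' : pvLFlag K m = false := by simpa using hf
          by_cases h0 : 0 ≤ pvLastKept K m
          · have hc2 : (pvLFlag K m = false ∧ 0 ≤ pvLastKept K m) := ⟨hf', h0⟩
            have hc3 : (True ∧ 0 ≤ pvLastKept K m) := ⟨trivial, h0⟩
            simp only [ih2, if_neg hf, ih3, if_pos hc2, if_pos hc3]
          · have hc2 : ¬(pvLFlag K m = false ∧ 0 ≤ pvLastKept K m) := by tauto
            have hc3 : ¬(True ∧ 0 ≤ pvLastKept K m) := by tauto
            simp only [ih2, if_neg hf, ih3, if_neg hc2, List.append_nil, if_neg hc3]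

-- A's emit loop over enumerate(lines) as a fold over List.range
theorem pvEmitA_eq (lines : List String) (keep : List Bool) :
    pvEmitA lines keep =
      ((List.range lines.length).foldl
        (fun (s : List String × Bool) (k : Nat) =>
          if keep.getD k false then (s.1 ++ [lines.getD k ""], true)
          else if s.2 then (s.1 ++ ["…"], false) else s) ([], false)).1 := by
  unfold pvEmitA
  rw [PySem.List.enumerate_eq_map_pyRange lines "", List.foldl_map, PySem.List.len_eq,
    PySem.List.pyRange_zero_natCast, List.foldl_map]
  simp only [Int.toNat_natCast, PySem.List.pyGetD_natCast]

-- B's no-match test, unfolded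
theorem pv_am_iff (lines toks : List String) :
    (((List.range lines.length).map
        (fun i => !((lines.map pvHdr).getD i false) && pvTokMatch toks (lines.getD i ""))).any
      (fun b => b) = true) ↔
    ∃ j : Nat, j < lines.length ∧ pvHdr (lines.getD j "") = false ∧
      pvTokMatch toks (lines.getD j "") = true := by
  rw [List.any_eq_true]
  constructor
  · rintro ⟨b, hb, hbt⟩
    rw [List.mem_map] at hb
    obtain ⟨i, hi, rfl⟩ := hb
    rw [List.mem_range] at hi
    rw [Bool.and_eq_true, Bool.not_eq_true'] at hbt
    exact ⟨i, hi, by rw [← pv_getD_map_hdr lines i hi]; exact hbt.1, hbt.2⟩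
  · rintro ⟨j, hj, ha, hb⟩
    refine ⟨_, List.mem_map.mpr ⟨j, List.mem_range.mpr hj, rfl⟩, ?_⟩
    rw [Bool.and_eq_true, Bool.not_eq_true']
    exact ⟨by rw [pv_getD_map_hdr lines j hj]; exact ha, hb⟩

-- A's fallback test, characterized
theorem pv_condA_iff (lines toks : List String) (kc : Int) :
    ((List.range lines.length).any
        (fun i => !(pvHdr (lines.getD i "")) && (pvKeepA lines toks kc).getD i false) = true) ↔
    (0 ≤ kc ∧ ∃ j : Nat, j < lines.length ∧ pvHdr (lines.getD j "") = false ∧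
      pvTokMatch toks (lines.getD j "") = true) := by
  rw [List.any_eq_true]
  constructor
  · rintro ⟨i, hi, hb⟩
    rw [List.mem_range] at hi
    rw [Bool.and_eq_true, Bool.not_eq_true'] at hb
    obtain ⟨hnh, hk⟩ := hb
    obtain ⟨_, hc⟩ := (pvKeepA_getD lines toks kc i).mp hk
    rcases hc with hh | ⟨j, hj, ha, hm, h1, h2⟩
    · rw [hnh] at hh; exact absurd hh (by simp)
    · exact ⟨by omega, j, hj, ha, hm⟩
  · rintro ⟨hkc, j, hj, ha, hm⟩
    refine ⟨j, List.mem_range.mpr hj, ?_⟩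
    rw [Bool.and_eq_true, Bool.not_eq_true']
    exact ⟨ha, (pvKeepA_getD lines toks kc j).mpr ⟨hj, Or.inr ⟨j, hj, ha, hm, by omega, by omega⟩⟩⟩

-- the trailing-ellipsis test of B agrees with the pending ellipsis of A's scan
theorem pv_trail_iff (K : Nat → Bool) (n : Nat) :
    ((pvLFlag K n = false ∧ 0 ≤ pvLastKept K n) ↔
      (0 ≤ pvLastKept K n ∧ pvLastKept K n < (n : Int) - 1)) := by
  have hlt := pvLastKept_lt K n
  cases n with
  | zero => simp [pvLastKept]
  | succ m =>
    have hiff := pvLastKept_succ_eq_iff K m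
    constructor
    · rintro ⟨hf, h0⟩
      have hKm : K m = false := by simpa [pvLFlag] using hf
      refine ⟨h0, ?_⟩
      have hne : pvLastKept K (m + 1) ≠ (m : Int) := fun h => by rw [hiff.mp h] at hKm; cases hKm
      push_cast
      omega
    · rintro ⟨h0, hl⟩
      have hne : pvLastKept K (m + 1) ≠ (m : Int) := by push_cast at hl; omega
      have hKm : K m = false := by
        rcases hKK : K m with _ | _
        · rfl
        · exact absurd (hiff.mpr hKK) hne
      exact ⟨by simpa [pvLFlag] using hKm, h0⟩

-- both post-guard bodies agree (t stands for the original text returned on fallback)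
theorem pv_body_eq (lines toks : List String) (kc : Int) (t : String) :
    (if !((List.range lines.length).any
          (fun i => !(pvHdr (lines.getD i "")) && (pvKeepA lines toks kc).getD i false)) then t
     else PySem.Str.join "\n" (pvEmitA lines (pvKeepA lines toks kc))) =
    (if kc < 0 ∨ !(((List.range lines.length).map
          (fun i => !((lines.map pvHdr).getD i false) && pvTokMatch toks (lines.getD i ""))).any
            (fun b => b)) then t
     else PySem.Str.join "\n" (pvEmitB lines ((List.range lines.length).filter
          (fun i => (lines.map pvHdr).getD i false ||
            pvWinAny ((List.range lines.length).map
              (fun j => !((lines.map pvHdr).getD j false) && pvTokMatch toks (lines.getD j "")))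
              (lines.length : Int) (i : Int) kc)))) := by
  have ham := pv_am_iff lines toks
  have hcA := pv_condA_iff lines toks kc
  have hiff : (((List.range lines.length).any
      (fun i => !(pvHdr (lines.getD i "")) && (pvKeepA lines toks kc).getD i false)) = false)
      ↔ (kc < 0 ∨ (((List.range lines.length).map
          (fun i => !((lines.map pvHdr).getD i false) && pvTokMatch toks (lines.getD i ""))).any
            (fun b => b)) = false) := by
    constructor
    · intro hx
      by_cases hkc : kc < 0
      · exact Or.inl hkc
      · refine Or.inr ?_
        rw [← Bool.not_eq_true]
        intro ham'
        have hcc := hcA.mpr ⟨by omega, ham.mp ham'⟩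
        rw [hx] at hcc; cases hcc
    · intro hor
      rw [← Bool.not_eq_true]
      intro hA
      obtain ⟨hkc, hex⟩ := hcA.mp hA
      rcases hor with h | h
      · omega
      · rw [← ham] at hex; rw [h] at hex; cases hex
  have hjoin : PySem.Str.join "\n" (pvEmitA lines (pvKeepA lines toks kc)) =
      PySem.Str.join "\n" (pvEmitB lines ((List.range lines.length).filter
        (fun i => (lines.map pvHdr).getD i false ||
          pvWinAny ((List.range lines.length).map
            (fun j => !((lines.map pvHdr).getD j false) && pvTokMatch toks (lines.getD j "")))
            (lines.length : Int) (i : Int) kc))) := by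
    have hq : ∀ i ∈ List.range lines.length,
        ((lines.map pvHdr).getD i false ||
          pvWinAny ((List.range lines.length).map
            (fun j => !((lines.map pvHdr).getD j false) && pvTokMatch toks (lines.getD j "")))
            (lines.length : Int) (i : Int) kc)
          = (pvKeepA lines toks kc).getD i false := by
      intro i hi
      have hi' := List.mem_range.mp hi
      exact Bool.eq_iff_iff.mpr
        ((pvKeptPred_iff lines toks kc i hi').trans (pvKeepA_getD lines toks kc i).symm)
    rw [List.filter_congr hq]
    congr 1
    rw [pvEmitA_eq]
    unfold pvEmitB
    rw [List.foldl_filter]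
    dsimp only
    obtain ⟨hB2, hA2, hL⟩ := pvEmit_rel (fun i => (pvKeepA lines toks kc).getD i false)
      (fun i => lines.getD i "") lines.length
    rw [hL, hB2]
    congr 1
    have hti := pv_trail_iff (fun i => (pvKeepA lines toks kc).getD i false) lines.length
    by_cases ht : 0 ≤ pvLastKept (fun i => (pvKeepA lines toks kc).getD i false) lines.length ∧
        pvLastKept (fun i => (pvKeepA lines toks kc).getD i false) lines.length <
          (lines.length : Int) - 1
    · rw [if_pos (hti.mpr ht), if_pos ht]
    · rw [if_neg (fun hh => ht (hti.mp hh)), if_neg ht]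
  have hpq : ((!((List.range lines.length).any
      (fun i => !(pvHdr (lines.getD i "")) && (pvKeepA lines toks kc).getD i false))) = true)
      ↔ (kc < 0 ∨ (!(((List.range lines.length).map
          (fun i => !((lines.map pvHdr).getD i false) && pvTokMatch toks (lines.getD i ""))).any
            (fun b => b))) = true) := by
    rw [Bool.not_eq_true', Bool.not_eq_true']
    exact hiff
  exact if_congr hpq rfl hjoin

-- ===== VERDICT (by name: the statement is the Claim_ definition above) =====
theorem filter_excel_by_tokens_spec : Claim_equal_filter_excel_by_tokens := by
  intro text tokens kc _
  unfold Spec_filter_excel_by_tokens filter_excel_by_tokens filter_excel_by_tokens_alt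
  by_cases hg : tokens = [] ∨ text = ""
  · rw [if_pos hg, if_pos hg]
  · rw [if_neg hg, if_neg hg]
    exact pv_body_eq (pvLinesOf text) (tokens.map PySem.Str.lower) kc text
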